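-- pv_equiv track=rewrite | github.com/Idearx/spiderfoot | sflib.py | sanitiseInput
-- ===== SOURCE A (Python) =====
-- def sanitiseInput(cmd):
--     """Verify input command is safe to execute
--
--     Args:
--         cmd (str): The command to check
--
--     Returns:
--         bool: command is "safe"
--     """
--
--     chars = ['a', 'b', 'c', 'd', 'e', 'f', 'g', 'h', 'i', 'j', 'k', 'l', 'm',
--              'n', 'o', 'p', 'q', 'r', 's', 't', 'u', 'v', 'w', 'x', 'y', 'z',
--              '0', '1', '2', '3', '4', '5', '6', '7', '8', '9', '-', '.']
--     for c in cmd: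
--         if c.lower() not in chars:
--             return False
--
--     if '..' in cmd:
--         return False
--
--     if cmd.startswith("-"):
--         return False
--
--     if len(cmd) < 3:
--         return False
--
--     return True
-- ===== SOURCE B (Python) =====
-- def sanitiseInput(cmd):
--     """Verify input command is safe to execute.
--
--     Single left-to-right scan: a tiny state machine tracking the position and
--     whether the previous character was a dot, rejecting on the spot; A's
--     staged passes (char loop, '..' search, startswith, len) disappear.
--     """
--     prev_dot = False
--     pos = 0
--     for ch in cmd:
--         if not ('a' <= ch <= 'z' or 'A' <= ch <= 'Z'
--                 or '0' <= ch <= '9' or ch == '-' or ch == '.'):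
--             return False
--         if pos == 0 and ch == '-':
--             return False
--         if ch == '.' and prev_dot:
--             return False
--         prev_dot = ch == '.'
--         pos += 1
--     return pos >= 3
-- ===== Notes on version B (the rewrite author's own statement) =====
-- stated objective: alternative
-- what changed: Replaces A's staged passes (per-char membership loop over a 38-element list, then a '..' substring search, startswith and len checks) by one left-to-right state-machine scan that tracks the position and whether the previous character was a dot, deciding everything in a single traversal with range comparisons instead of list membership.
import Mathlib
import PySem

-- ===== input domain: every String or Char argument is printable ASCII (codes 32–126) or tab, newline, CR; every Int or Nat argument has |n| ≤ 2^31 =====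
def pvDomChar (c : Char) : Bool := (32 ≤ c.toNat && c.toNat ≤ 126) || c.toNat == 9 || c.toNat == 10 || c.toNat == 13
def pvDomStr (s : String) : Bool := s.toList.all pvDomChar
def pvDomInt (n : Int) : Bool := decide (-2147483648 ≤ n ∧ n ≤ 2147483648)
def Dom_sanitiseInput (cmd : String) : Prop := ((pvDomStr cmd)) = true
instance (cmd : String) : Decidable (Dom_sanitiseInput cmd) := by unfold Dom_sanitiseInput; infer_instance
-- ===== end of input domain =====

-- B replaces A's staged passes (char-membership loop, '..' substring search, startswith, len)
-- by one single-pass state machine over the string; alternative decomposition, same behaviour.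

-- ===== PORT A =====
def sanitiseA_chars : List Char :=
  ['a', 'b', 'c', 'd', 'e', 'f', 'g', 'h', 'i', 'j', 'k', 'l', 'm',
   'n', 'o', 'p', 'q', 'r', 's', 't', 'u', 'v', 'w', 'x', 'y', 'z',
   '0', '1', '2', '3', '4', '5', '6', '7', '8', '9', '-', '.']

-- the 'for c in cmd: if c.lower() not in chars: return False' loop (true = fell through)
def sanitiseA_loop : List Char → Bool
  | [] => true
  | c :: rest =>
    if PySem.Chars.lowerChar c ∉ sanitiseA_chars then false else sanitiseA_loop rest

def sanitiseInput (cmd : String) : Bool :=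
  if !(sanitiseA_loop cmd.toList) then false
  else if PySem.Str.isIn ".." cmd then false
  else if PySem.Str.startswith cmd "-" then false
  else if PySem.Str.len cmd < 3 then false
  else true

-- ===== PORT B =====
-- 'a' <= ch <= 'z' or 'A' <= ch <= 'Z' or '0' <= ch <= '9' or ch == '-' or ch == '.'
def sanitiseB_allowed (c : Char) : Bool :=
  ('a' ≤ c && c ≤ 'z') || ('A' ≤ c && c ≤ 'Z') || ('0' ≤ c && c ≤ '9') || c == '-' || c == '.'

-- the for-loop: state = (prev_dot, pos); falling through runs 'return pos >= 3'
def sanitiseB_scan : List Char → Bool → Nat → Bool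
  | [], _, pos => decide (3 ≤ pos)
  | c :: rest, prevDot, pos =>
    if !sanitiseB_allowed c then false
    else if pos == 0 && c == '-' then false
    else if c == '.' && prevDot then false
    else sanitiseB_scan rest (c == '.') (pos + 1)

def sanitiseInput_alt (cmd : String) : Bool := sanitiseB_scan cmd.toList false 0

-- ===== PRECONDITION & SPEC =====
def Spec_sanitiseInput (cmd : String) (out : Bool) : Prop := out = sanitiseInput_alt cmd
instance (cmd : String) (out : Bool) : Decidable (Spec_sanitiseInput cmd out) := by unfold Spec_sanitiseInput; infer_instance

-- ===== CLAIM (what is proved, stated in full; the proofs are below) =====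
def Claim_equal_sanitiseInput : Prop := ∀ (cmd : String), Dom_sanitiseInput cmd → Spec_sanitiseInput cmd (sanitiseInput cmd)

-- ===== LEMMAS AND PROOFS =====

-- A's `c.lower() in chars` agrees with B's range test on every domain character (checked over codes < 128)
def sanitiseAllowedCheck (n : Nat) : Bool :=
  (decide (PySem.Chars.lowerChar (Char.ofNat n) ∈ sanitiseA_chars)) == sanitiseB_allowed (Char.ofNat n)

theorem sanitiseAllowedCheck_all : ∀ n, n < 128 → sanitiseAllowedCheck n = true := by decide

theorem sanitise_allowed_agree (c : Char) (h : pvDomChar c = true) :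
    (PySem.Chars.lowerChar c ∈ sanitiseA_chars) ↔ sanitiseB_allowed c = true := by
  have hn : c.toNat < 128 := by
    simp [pvDomChar] at h; omega
  have := sanitiseAllowedCheck_all c.toNat hn
  rw [sanitiseAllowedCheck, Char.ofNat_toNat, beq_iff_eq] at this
  rw [← this]; simp

theorem sanitiseA_loop_iff (cs : List Char) :
    sanitiseA_loop cs = true ↔ ∀ c ∈ cs, PySem.Chars.lowerChar c ∈ sanitiseA_chars := by
  induction cs with
  | nil => simp [sanitiseA_loop]
  | cons c rest ih =>
    simp only [sanitiseA_loop, List.mem_cons]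
    by_cases h : PySem.Chars.lowerChar c ∈ sanitiseA_chars
    · simp [h, ih]
    · simp [h]

-- 'no two adjacent dots', threading the incoming prev_dot flag
def sanitiseNoDD : Bool → List Char → Prop
  | _, [] => True
  | p, c :: r => ¬(p = true ∧ c = '.') ∧ sanitiseNoDD (c == '.') r

theorem sanitise_head_single (a : Char) (l : List Char) : [a] <+: l ↔ l.head? = some a := by
  cases l <;> simp [List.cons_prefix_cons, eq_comm]

theorem sanitiseNoDD_iff (cs : List Char) (p : Bool) :
    sanitiseNoDD p cs ↔ ¬(['.', '.'] <:+: cs) ∧ (p = true → cs.head? ≠ some '.') := by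
  induction cs generalizing p with
  | nil => simp [sanitiseNoDD]
  | cons c r ih =>
    simp only [sanitiseNoDD, ih, List.infix_cons_iff, List.cons_prefix_cons,
      sanitise_head_single, List.head?_cons]
    constructor
    · rintro ⟨h1, h2, h3⟩
      constructor
      · rintro (⟨he, hh⟩ | hinf)
        · exact h3 (beq_iff_eq.mpr he.symm) hh
        · exact h2 hinf
      · intro hp hsc
        exact h1 ⟨hp, Option.some.inj hsc⟩
    · rintro ⟨h1, h2⟩
      exact ⟨fun hh => h2 hh.1 (congrArg some hh.2), fun hinf => h1 (Or.inr hinf),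
        fun hc hh => h1 (Or.inl ⟨(beq_iff_eq.mp hc).symm, hh⟩)⟩

theorem sanitiseB_scan_iff (cs : List Char) (p : Bool) (pos : Nat) :
    sanitiseB_scan cs p pos = true ↔
      (∀ c ∈ cs, sanitiseB_allowed c = true) ∧ (pos = 0 → cs.head? ≠ some '-') ∧
      sanitiseNoDD p cs ∧ 3 ≤ pos + cs.length := by
  induction cs generalizing p pos with
  | nil => simp [sanitiseB_scan, sanitiseNoDD]
  | cons c r ih =>
    simp only [sanitiseB_scan, sanitiseNoDD, List.mem_cons, List.head?_cons, List.length_cons]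
    by_cases ha : sanitiseB_allowed c = true
    · by_cases hd : pos = 0 ∧ c = '-'
      · simp only [hd.1, hd.2]
        simp
      · by_cases hp : c = '.' ∧ p = true
        · have hb : (c == '.' && p) = true := by simp [hp.1, hp.2]
          have hnd : (pos == 0 && c == '-') = false := by
            rcases Decidable.not_and_iff_not_or_not.mp hd with h | h <;> simp [h]
          simp only [ha, Bool.not_true, Bool.false_eq_true, if_false, hnd, hb, if_true]
          constructor
          · intro h; cases h
          · rintro ⟨-, -, ⟨h3, -⟩, -⟩; exact h3 ⟨hp.2, hp.1⟩
        · have hnd : (pos == 0 && c == '-') = false := by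
            rcases Decidable.not_and_iff_not_or_not.mp hd with h | h <;> simp [h]
          have hnp : (c == '.' && p) = false := by
            rcases Decidable.not_and_iff_not_or_not.mp hp with h | h <;> simp [h]
          simp only [ha, Bool.not_true, Bool.false_eq_true, if_false, hnd, hnp, ih]
          constructor
          · rintro ⟨h1, -, h3, h4⟩
            refine ⟨fun c' hc' => hc'.elim (fun e => e ▸ ha) (h1 c'), ?_, ?_, by omega⟩
            · intro h0 hc; exact hd ⟨h0, Option.some.inj hc⟩
            · exact ⟨fun hh => hp ⟨hh.2, hh.1⟩, h3⟩
          · rintro ⟨h1, -, ⟨-, h3⟩, h4⟩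
            exact ⟨fun c' hc' => h1 c' (Or.inr hc'), fun h => by omega, h3, by omega⟩
    · have ha' : sanitiseB_allowed c = false := by simpa using ha
      simp only [ha', Bool.not_false, if_true, Bool.false_eq_true, false_iff]
      rintro ⟨h1, -⟩
      exact ha (h1 c (Or.inl rfl))

-- ===== VERDICT (by name: the statement is the Claim_ definition above) =====
theorem sanitiseInput_spec : Claim_equal_sanitiseInput := by
  intro cmd hdom
  unfold Spec_sanitiseInput sanitiseInput sanitiseInput_alt
  have hdom' : ∀ c ∈ cmd.toList, pvDomChar c = true := by
    simpa [Dom_sanitiseInput, pvDomStr, List.all_eq_true] using hdom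
  have e2 : (".." : String).toList = ['.', '.'] := rfl
  have e3 : ("-" : String).toList = ['-'] := rfl
  have elen : cmd.length = cmd.toList.length := rfl
  rw [Bool.eq_iff_iff, sanitiseB_scan_iff]
  simp only [PySem.Str.isIn_eq, PySem.Str.startswith_eq, PySem.Str.len_eq, e2, e3]
  constructor
  · intro h
    split_ifs at h with h1 h2 h3 h4
    have h1' : sanitiseA_loop cmd.toList = true := by simpa using h1
    refine ⟨?_, ?_, ?_, ?_⟩
    · intro c hc
      exact (sanitise_allowed_agree c (hdom' c hc)).mp ((sanitiseA_loop_iff _).mp h1' c hc)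
    · intro _ hhd
      exact h3 ((PySem.Chars.startswith_iff _ _).mpr ((sanitise_head_single '-' _).mpr hhd))
    · rw [sanitiseNoDD_iff]
      exact ⟨fun hinf => h2 ((PySem.Chars.isIn_iff_infix _ _).mpr hinf), by simp⟩
    · omega
  · rintro ⟨hall, hpre, hdd, hlen⟩
    have h1 : sanitiseA_loop cmd.toList = true := by
      rw [sanitiseA_loop_iff]
      intro c hc
      exact (sanitise_allowed_agree c (hdom' c hc)).mpr (hall c hc)
    have h2 : PySem.Chars.isIn ['.', '.'] cmd.toList = false := by
      rw [PySem.Chars.isIn_eq_false_iff]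
      exact ((sanitiseNoDD_iff _ _).mp hdd).1
    have h3 : PySem.Chars.startswith cmd.toList ['-'] = false := by
      rw [Bool.eq_false_iff]
      intro hSt
      exact hpre trivial ((sanitise_head_single '-' _).mp ((PySem.Chars.startswith_iff _ _).mp hSt))
    simp only [h1, h2, h3, Bool.not_true, Bool.false_eq_true, if_false]
    rw [if_neg (by omega)]
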